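-- pv_equiv track=rewrite | github.com/radoslawrolka/Introduction_to_Computer_Science_Course | Zestaw_3/z15_d.py | zad15
-- ===== SOURCE A (Python) =====
-- import math
--
-- def is_prime(x):
--     if x < 2:
--         return False
--     if x == 2 or x == 3:
--         return True
--     if x % 2 == 0 or x % 3 == 0:
--         return False
--     i = 5
--     while i < math.sqrt(x) + 1:
--         if x % i == 0:
--             return False
--         i += 2
--         if x % i == 0:
--             return False
--         i += 4
--     return True
--
-- def zad15(tab):
--     czy_pierwsza = 0
--     prev = 1
--     curr = 1
--     for i in range(len(tab)):
--         if i == curr: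
--             prev, curr = curr, prev + curr
--             if is_prime(tab[i]):
--                 return False
--         else:
--             if not czy_pierwsza:
--                 if is_prime(tab[i]):
--                     czy_pierwsza = 1
--     if czy_pierwsza == 1:
--         return True
--     else:
--         return False
-- ===== SOURCE B (Python) =====
-- import math
--
-- def is_prime(x):
--     if x < 2:
--         return False
--     if x == 2 or x == 3:
--         return True
--     if x % 2 == 0 or x % 3 == 0:
--         return False
--     i = 5
--     while i < math.sqrt(x) + 1:
--         if x % i == 0:
--             return False
--         i += 2
--         if x % i == 0:
--             return False
--         i += 4
--     return True
--
-- def zad15(tab):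
--     n = len(tab)
--     fibs = set()
--     a, b = 1, 1
--     while b < n:
--         fibs.add(b)
--         a, b = b, a + b
--     if any(is_prime(tab[i]) for i in fibs):
--         return False
--     return any(is_prime(tab[i]) for i in range(n) if i not in fibs)
-- ===== Notes on version B (the rewrite author's own statement) =====
-- stated objective: simpler
-- what changed: A's single interleaved loop that steps the Fibonacci pair in-line, keeps a found-prime flag and early-returns is replaced by precomputing the list of Fibonacci indices below len(tab) and then doing two separate existence passes (any over the Fibonacci indices, then any over the remaining indices).
import Mathlib
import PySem

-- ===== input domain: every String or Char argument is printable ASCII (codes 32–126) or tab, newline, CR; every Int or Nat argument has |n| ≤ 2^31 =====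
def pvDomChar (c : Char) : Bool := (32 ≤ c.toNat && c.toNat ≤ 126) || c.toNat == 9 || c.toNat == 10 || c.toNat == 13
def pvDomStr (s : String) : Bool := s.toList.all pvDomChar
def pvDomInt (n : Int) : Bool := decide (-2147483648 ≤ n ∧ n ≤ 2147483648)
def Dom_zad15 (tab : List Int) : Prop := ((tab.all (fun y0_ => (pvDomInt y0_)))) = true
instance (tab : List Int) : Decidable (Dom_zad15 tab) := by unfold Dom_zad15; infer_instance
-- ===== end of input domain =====

-- B replaces A's single interleaved loop (flag + in-line Fibonacci stepping + early return)
-- by a precomputed Fibonacci-index list and two separate existence passes; objective: simpler.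

-- ===== PORT A =====
-- shared helper: is_prime.  Python's 'while i < math.sqrt(x)+1' is ported as the exact
-- integer condition '(i-1)*(i-1) < x' (equal for integer i ≥ 5 and |x| ≤ 2^31, where the
-- correctly-rounded double sqrt cannot cross an integer); the trial loop runs on fuel
-- x.toNat, which exceeds the ≤ √x/6+1 iterations the condition permits, so the fuel case
-- is never the exit on any input.
def isPrimeLoop (x : Int) : Nat → Int → Bool
  | 0, _ => true
  | fuel + 1, i =>
    if (i - 1) * (i - 1) < x then
      if PySem.Int.mod x i == 0 then false
      else if PySem.Int.mod x (i + 2) == 0 then false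
      else isPrimeLoop x fuel (i + 6)
    else true

def isPrime (x : Int) : Bool :=
  if x < 2 then false
  else if x == 2 || x == 3 then true
  else if PySem.Int.mod x 2 == 0 || PySem.Int.mod x 3 == 0 then false
  else isPrimeLoop x x.toNat 5

-- A's loop over i = 0 .. len(tab)-1 with state (czy_pierwsza, prev, curr)
def zad15Go (tab : List Int) (i : Nat) (czy prev curr : Int) : Bool :=
  if i < tab.length then
    if (i : Int) = curr then
      if isPrime (PySem.List.pyGetD tab (i : Int) 0) then false
      else zad15Go tab (i + 1) czy curr (prev + curr)
    else
      if czy = 0 then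
        if isPrime (PySem.List.pyGetD tab (i : Int) 0) then zad15Go tab (i + 1) 1 prev curr
        else zad15Go tab (i + 1) czy prev curr
      else zad15Go tab (i + 1) czy prev curr
  else czy == 1
termination_by tab.length - i

def zad15 (tab : List Int) : Bool := zad15Go tab 0 0 1 1

-- ===== PORT B =====
-- the Fibonacci indices b = 1, 2, 3, 5, 8, … below n (python: while b < n: fibs.add(b); a,b = b,a+b)
def fibGo (n : Int) (a b : Int) (ha : 0 < a) (hb : 0 < b) : List Int :=
  if h : b < n then b :: fibGo n b (a + b) hb (by omega) else []
termination_by (n - b).toNat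
decreasing_by omega

def zad15_alt (tab : List Int) : Bool :=
  let fibs := fibGo (tab.length : Int) 1 1 (by omega) (by omega)
  if fibs.any (fun i => isPrime (PySem.List.pyGetD tab i 0)) then false
  else (List.range tab.length).any
    (fun i => !(fibs.contains (i : Int)) && isPrime (PySem.List.pyGetD tab (i : Int) 0))

-- ===== PRECONDITION & SPEC =====
def Spec_zad15 (tab : List Int) (out : Bool) : Prop := out = zad15_alt tab
instance (tab : List Int) (out : Bool) : Decidable (Spec_zad15 tab out) := by unfold Spec_zad15; infer_instance

-- ===== CLAIM (what is proved, stated in full; the proofs are below) =====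
def Claim_equal_zad15 : Prop := ∀ (tab : List Int), Dom_zad15 tab → Spec_zad15 tab (zad15 tab)

-- ===== LEMMAS AND PROOFS =====

theorem fibGo_mem_ge (n a b : Int) (ha : 0 < a) (hb : 0 < b) :
    ∀ j ∈ fibGo n a b ha hb, b ≤ j := by
  fun_induction fibGo n a b ha hb with
  | case1 a b ha hb h ih =>
    intro j hj
    rcases List.mem_cons.mp hj with h1 | h2
    · omega
    · have := ih j h2; omega
  | case2 => intro j hj; simp at hj

theorem loop_eq_aux (tab : List Int) (m : Nat) :
    ∀ (i : Nat) (czy prev curr : Int) (ha : 0 < prev) (hb : 0 < curr),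
    tab.length - i = m → (i : Int) ≤ curr → czy = 0 ∨ czy = 1 →
    zad15Go tab i czy prev curr =
      if (fibGo (tab.length : Int) prev curr ha hb).any
          (fun j => isPrime (PySem.List.pyGetD tab j 0)) then false
      else (czy == 1) || (List.range' i (tab.length - i)).any
          (fun j => !((fibGo (tab.length : Int) prev curr ha hb).contains (j : Int)) &&
            isPrime (PySem.List.pyGetD tab (j : Int) 0)) := by
  induction m with
  | zero =>
    intro i czy prev curr ha hb hm hi hczy
    have hle : tab.length ≤ i := by omega
    have hfib : fibGo (tab.length : Int) prev curr ha hb = [] := by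
      rw [fibGo]; simp; omega
    rw [zad15Go]
    simp [Nat.not_lt.mpr hle, hfib, hm]
  | succ m ih =>
    intro i czy prev curr ha hb hm hi hczy
    have hlt : i < tab.length := by omega
    have hm' : tab.length - (i + 1) = m := by omega
    have hrange : List.range' i (tab.length - i) = i :: List.range' (i + 1) m := by
      rw [hm, List.range'_succ]
    rw [zad15Go, if_pos hlt]
    by_cases hic : (i : Int) = curr
    · rw [if_pos hic]
      have hcn : curr < (tab.length : Int) := by
        have : (i : Int) < (tab.length : Int) := by exact_mod_cast hlt
        omega
      have hfib : fibGo (tab.length : Int) prev curr ha hb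
          = curr :: fibGo (tab.length : Int) curr (prev + curr) hb (by omega) := by
        rw [fibGo]; simp [hcn]
      rw [hfib, hrange]
      have htail : (List.range' (i + 1) m).any
          (fun j => !((curr :: fibGo (tab.length : Int) curr (prev + curr) hb (by omega)).contains (j : Int)) &&
            isPrime (PySem.List.pyGetD tab (j : Int) 0))
        = (List.range' (i + 1) m).any
          (fun j => !((fibGo (tab.length : Int) curr (prev + curr) hb (by omega)).contains (j : Int)) &&
            isPrime (PySem.List.pyGetD tab (j : Int) 0)) := by
        apply PySem.List.any_congr_mem
        intro j hj
        have hjge : i + 1 ≤ j := (List.mem_range'_1.mp hj).1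
        have hne : ¬ ((j : Int) = curr) := by omega
        simp [hne]
      by_cases hp : isPrime (PySem.List.pyGetD tab (i : Int) 0)
      · rw [if_pos hp]
        have hpc : isPrime (PySem.List.pyGetD tab curr 0) = true := by rw [← hic]; exact hp
        simp at hpc
        simp [hpc]
      · rw [if_neg hp,
          ih (i + 1) czy curr (prev + curr) hb (by omega) (by omega) (by omega) hczy]
        have hpc : isPrime (PySem.List.pyGetD tab curr 0) = false := by
          rw [← hic]; exact Bool.eq_false_iff.mpr hp
        simp at hpc
        simp at htail
        simp [hm', hpc, hic, htail]
    · rw [if_neg hic]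
      have hic' : (i : Int) < curr := lt_of_le_of_ne hi hic
      have hnm : ¬ ((i : Int) ∈ fibGo (tab.length : Int) prev curr ha hb) := by
        intro hmem
        have := fibGo_mem_ge _ _ _ ha hb _ hmem
        omega
      rcases hczy with h0 | h1
      · subst h0
        rw [if_pos rfl]
        by_cases hp : isPrime (PySem.List.pyGetD tab (i : Int) 0)
        · rw [if_pos hp,
            ih (i + 1) 1 prev curr ha hb (by omega) (by omega) (Or.inr rfl)]
          simp at hp
          rw [hrange]
          simp [hnm, hp, hm']
        · rw [if_neg hp,
            ih (i + 1) 0 prev curr ha hb (by omega) (by omega) (Or.inl rfl)]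
          have hpf : isPrime (PySem.List.pyGetD tab (i : Int) 0) = false := Bool.eq_false_iff.mpr hp
          simp at hpf
          rw [hrange]
          simp [hpf, hm']
      · subst h1
        rw [if_neg (by omega : ¬ ((1 : Int) = 0)),
          ih (i + 1) 1 prev curr ha hb (by omega) (by omega) (Or.inr rfl)]
        rw [hrange]
        simp [hm']

theorem loop_eq (tab : List Int) (i : Nat) (czy prev curr : Int)
    (ha : 0 < prev) (hb : 0 < curr) (hi : (i : Int) ≤ curr) (hczy : czy = 0 ∨ czy = 1) :
    zad15Go tab i czy prev curr =
      if (fibGo (tab.length : Int) prev curr ha hb).any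
          (fun j => isPrime (PySem.List.pyGetD tab j 0)) then false
      else (czy == 1) || (List.range' i (tab.length - i)).any
          (fun j => !((fibGo (tab.length : Int) prev curr ha hb).contains (j : Int)) &&
            isPrime (PySem.List.pyGetD tab (j : Int) 0)) :=
  loop_eq_aux tab (tab.length - i) i czy prev curr ha hb rfl hi hczy

-- ===== VERDICT (by name: the statement is the Claim_ definition above) =====
theorem zad15_spec : Claim_equal_zad15 := by
  intro tab _
  unfold Spec_zad15 zad15 zad15_alt
  rw [loop_eq tab 0 0 1 1 (by omega) (by omega) (by omega) (Or.inl rfl)]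
  simp [List.range_eq_range']
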